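-- pv_equiv track=rewrite | github.com/wenet-e2e/wenet | wenet/utils/ctc_utils.py | gen_ctc_peak_time
-- ===== SOURCE A (Python) =====
-- from typing import List, Tuple
--
-- def gen_ctc_peak_time(hyp: List[int]) -> List[int]:
--     times = []
--     cur = 0
--     while cur < len(hyp):
--         if hyp[cur] != 0:
--             times.append(cur)
--         prev = cur
--         while cur < len(hyp) and hyp[cur] == hyp[prev]:
--             cur += 1
--     return times
-- ===== SOURCE B (Python) =====
-- from typing import List
--
-- def gen_ctc_peak_time(hyp: List[int]) -> List[int]:
--     return [i for i in range(len(hyp))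
--             if hyp[i] != 0 and (i == 0 or hyp[i] != hyp[i - 1])]
-- ===== Notes on version B (the rewrite author's own statement) =====
-- stated objective: simpler
-- what changed: Replaces the nested run-collapsing while loops (run-start pointer plus inner skip loop) by a single flat comprehension over indices that keeps an index when its element is nonzero and differs from its predecessor.
import Mathlib
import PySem

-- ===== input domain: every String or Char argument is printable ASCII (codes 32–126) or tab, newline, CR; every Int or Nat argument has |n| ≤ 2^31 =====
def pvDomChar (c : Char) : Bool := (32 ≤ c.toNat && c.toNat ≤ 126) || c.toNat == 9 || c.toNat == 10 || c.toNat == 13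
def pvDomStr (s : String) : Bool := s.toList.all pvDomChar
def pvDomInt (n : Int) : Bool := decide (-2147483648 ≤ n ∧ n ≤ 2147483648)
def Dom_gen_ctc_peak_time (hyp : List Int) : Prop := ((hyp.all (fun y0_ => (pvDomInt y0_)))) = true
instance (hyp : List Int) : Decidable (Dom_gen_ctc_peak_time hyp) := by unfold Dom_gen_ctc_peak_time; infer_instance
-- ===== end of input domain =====

-- B replaces A's nested run-collapsing while loops by a single flat filter over
-- indices comparing each element with its predecessor (objective: simpler).

-- ===== PORT A =====
-- inner `while cur < len(hyp) and hyp[cur] == hyp[prev]: cur += 1`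
-- (hyp[prev] is the fixed value v taken at the run start)
def skipA (hyp : List Int) (v : Int) (cur : Nat) : Nat :=
  if _h : cur < hyp.length ∧ hyp.getD cur 0 = v then skipA hyp v (cur + 1) else cur
termination_by hyp.length - cur
decreasing_by omega

-- termination facts for the outer loop (cited by name in loopA's decreasing_by)
theorem skipA_ge (hyp : List Int) (v : Int) (cur : Nat) : cur ≤ skipA hyp v cur := by
  unfold skipA
  split
  · exact le_trans (Nat.le_succ cur) (skipA_ge hyp v (cur + 1))
  · exact le_refl cur
termination_by hyp.length - cur
decreasing_by omega

theorem skipA_gt (hyp : List Int) (cur : Nat) (h : cur < hyp.length) :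
    cur < skipA hyp (hyp.getD cur 0) cur := by
  rw [skipA, dif_pos (And.intro h rfl)]
  exact lt_of_lt_of_le (Nat.lt_succ_self cur) (skipA_ge hyp (hyp.getD cur 0) (cur + 1))

-- outer `while cur < len(hyp)` loop of A
def loopA (hyp : List Int) (cur : Nat) (times : List Int) : List Int :=
  if h : cur < hyp.length then
    loopA hyp (skipA hyp (hyp.getD cur 0) cur)
      (if hyp.getD cur 0 ≠ 0 then times ++ [Int.ofNat cur] else times)
  else times
termination_by hyp.length - cur
decreasing_by exact Nat.sub_lt_sub_left h (skipA_gt hyp cur h)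

def gen_ctc_peak_time (hyp : List Int) : List Int := loopA hyp 0 []

-- ===== PORT B =====
-- [i for i in range(len(hyp)) if hyp[i] != 0 and (i == 0 or hyp[i] != hyp[i-1])]
def gen_ctc_peak_time_alt (hyp : List Int) : List Int :=
  ((List.range hyp.length).filter
    (fun i => decide (hyp.getD i 0 ≠ 0 ∧ (i = 0 ∨ hyp.getD i 0 ≠ hyp.getD (i - 1) 0)))).map
    Int.ofNat

-- ===== PRECONDITION & SPEC =====
def Spec_gen_ctc_peak_time (hyp : List Int) (out : List Int) : Prop := out = gen_ctc_peak_time_alt hyp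
instance (hyp : List Int) (out : List Int) : Decidable (Spec_gen_ctc_peak_time hyp out) := by unfold Spec_gen_ctc_peak_time; infer_instance

-- ===== CLAIM (what is proved, stated in full; the proofs are below) =====
def Claim_equal_gen_ctc_peak_time : Prop := ∀ (hyp : List Int), Dom_gen_ctc_peak_time hyp → Spec_gen_ctc_peak_time hyp (gen_ctc_peak_time hyp)

-- ===== LEMMAS AND PROOFS =====

-- B's filter predicate, named for the proofs
def condB (hyp : List Int) (i : Nat) : Bool :=
  decide (hyp.getD i 0 ≠ 0 ∧ (i = 0 ∨ hyp.getD i 0 ≠ hyp.getD (i - 1) 0))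

theorem skipA_le (hyp : List Int) (v : Int) (cur : Nat) (h : cur ≤ hyp.length) :
    skipA hyp v cur ≤ hyp.length := by
  rw [skipA]
  split
  · next hc => exact skipA_le hyp v (cur + 1) hc.1
  · exact h
termination_by hyp.length - cur
decreasing_by omega

-- every index in [cur, skipA hyp v cur) carries the value v
theorem skipA_all (hyp : List Int) (v : Int) (cur i : Nat)
    (h1 : cur ≤ i) (h2 : i < skipA hyp v cur) : hyp.getD i 0 = v := by
  rw [skipA] at h2
  split at h2
  · next hc =>
    rcases Nat.eq_or_lt_of_le h1 with he | hl
    · subst he; exact hc.2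
    · exact skipA_all hyp v (cur + 1) i hl h2
  · omega
termination_by hyp.length - cur
decreasing_by omega

-- where skipA stops, the inner-while condition fails
theorem skipA_stop (hyp : List Int) (v : Int) (cur : Nat) :
    ¬ (skipA hyp v cur < hyp.length ∧ hyp.getD (skipA hyp v cur) 0 = v) := by
  rw [skipA]
  split
  · exact skipA_stop hyp v (cur + 1)
  · next hc => exact hc
termination_by hyp.length - cur
decreasing_by omega

-- loop invariant: from a run start `cur`, A's outer loop appends exactly B's
-- filtered indices of [cur, hyp.length)
theorem loopA_eq_aux (n : Nat) : ∀ (hyp : List Int) (cur : Nat) (times : List Int),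
    hyp.length - cur = n →
    (cur = 0 ∨ hyp.length ≤ cur ∨ hyp.getD cur 0 ≠ hyp.getD (cur - 1) 0) →
    loopA hyp cur times =
      times ++ ((List.range' cur (hyp.length - cur)).filter (condB hyp)).map Int.ofNat := by
  induction n using Nat.strong_induction_on with
  | _ n IH =>
  intro hyp cur times hn hstart
  rw [loopA]
  split
  · next hlt =>
    set v := hyp.getD cur 0 with hv
    set j := skipA hyp v cur with hj
    have hcurj : cur < j := skipA_gt hyp cur hlt
    have hjle : j ≤ hyp.length := skipA_le hyp v cur (le_of_lt hlt)
    have hstop := skipA_stop hyp v cur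
    -- j is itself a run start
    have hjstart : j = 0 ∨ hyp.length ≤ j ∨ hyp.getD j 0 ≠ hyp.getD (j - 1) 0 := by
      by_cases hjlen : j < hyp.length
      · right; right
        have hjm1 : hyp.getD (j - 1) 0 = v := skipA_all hyp v cur (j - 1) (by omega) (by omega)
        rw [hjm1]
        intro hcontra
        exact hstop ⟨hjlen, hcontra⟩
      · right; left; omega
    have ih := IH (hyp.length - j) (by omega) hyp j
      (if hyp.getD cur 0 ≠ 0 then times ++ [Int.ofNat cur] else times) rfl hjstart
    rw [ih]
    -- split the index range at j
    have hsplit : List.range' cur (hyp.length - cur) =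
        List.range' cur (j - cur) ++ List.range' j (hyp.length - j) := by
      rw [show hyp.length - cur = (j - cur) + (hyp.length - j) by omega, ← List.range'_append]
      simp only [one_mul]
      congr 2
      omega
    rw [hsplit, List.filter_append, List.map_append]
    -- the first chunk filters to [cur] or []
    have hchunk : (List.range' cur (j - cur)).filter (condB hyp) =
        if hyp.getD cur 0 ≠ 0 then [cur] else [] := by
      have hcons : List.range' cur (j - cur) = cur :: List.range' (cur + 1) (j - cur - 1) := by
        rw [show j - cur = (j - cur - 1) + 1 by omega]
        rw [List.range'_succ]
        simp
      rw [hcons, List.filter_cons]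
      have htail : (List.range' (cur + 1) (j - cur - 1)).filter (condB hyp) = [] := by
        apply List.filter_eq_nil_iff.mpr
        intro i hi
        rw [List.mem_range'_1] at hi
        have hiv : hyp.getD i 0 = v := skipA_all hyp v cur i (by omega) (by omega)
        have him1 : hyp.getD (i - 1) 0 = v := skipA_all hyp v cur (i - 1) (by omega) (by omega)
        simp only [condB, decide_eq_true_eq]
        push_neg
        intro _
        constructor
        · omega
        · rw [hiv, him1]
      rw [htail]
      have hcondcur : condB hyp cur = decide (hyp.getD cur 0 ≠ 0) := by
        simp only [condB, decide_eq_decide]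
        constructor
        · intro h1; exact h1.1
        · intro h1
          refine ⟨h1, ?_⟩
          rcases hstart with h0 | h0 | h0
          · left; exact h0
          · omega
          · right; exact h0
      rw [hcondcur]
      by_cases hz : hyp.getD cur 0 ≠ 0 <;> simp [hz]
    rw [hchunk]
    simp only [List.getD]
    by_cases hz : hyp[cur]?.getD 0 = 0 <;> simp [hz]
  · next hge =>
    rw [show hyp.length - cur = 0 by omega]
    simp [List.range']

theorem loopA_eq (hyp : List Int) (cur : Nat) (times : List Int)
    (hstart : cur = 0 ∨ hyp.length ≤ cur ∨ hyp.getD cur 0 ≠ hyp.getD (cur - 1) 0) :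
    loopA hyp cur times =
      times ++ ((List.range' cur (hyp.length - cur)).filter (condB hyp)).map Int.ofNat :=
  loopA_eq_aux (hyp.length - cur) hyp cur times rfl hstart

-- ===== VERDICT (by name: the statement is the Claim_ definition above) =====
theorem gen_ctc_peak_time_spec : Claim_equal_gen_ctc_peak_time := by
  intro hyp _
  show gen_ctc_peak_time hyp = gen_ctc_peak_time_alt hyp
  unfold gen_ctc_peak_time gen_ctc_peak_time_alt
  rw [loopA_eq hyp 0 [] (Or.inl rfl), List.range_eq_range']
  rw [show hyp.length - 0 = hyp.length from rfl]
  rw [show condB hyp = (fun i => decide (hyp.getD i 0 ≠ 0 ∧ (i = 0 ∨ hyp.getD i 0 ≠ hyp.getD (i - 1) 0))) from rfl]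
  simp
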